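-- pv_equiv track=rewrite | github.com/kimyoungseok3232/coding-test | 프로그래머스/난이도 3/봉인된 주문.py | solution
-- ===== SOURCE A (Python) =====
-- def solution(n, bans):
--     answer = ''
--     a_dict = {chr(i+96):i for i in range(1,27)}
--     ban_int = []
--     for ban in bans:
--         tmp = 0
--         mul = 1
--         for idx, a in enumerate(reversed(ban)):
--             tmp += mul*a_dict[a]
--             mul *= 26
--         ban_int.append(tmp)
--
--     ban_int.sort()
--     for ban in ban_int:
--         if ban <= n: n += 1
--
--     while n:
--         n -= 1
--         answer = chr(97 + n % 26) + answer
--         n //= 26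
--
--     return answer
-- ===== SOURCE B (Python) =====
-- def solution(n, bans):
--     def word_val(w):
--         v = 0
--         for ch in w:
--             v = v * 26 + ord(ch) - 96
--         return v
--
--     def int_to_word(v):
--         if v <= 0:
--             return ''
--         return int_to_word((v - 1) // 26) + chr(97 + (v - 1) % 26)
--
--     ban_int = sorted(word_val(b) for b in bans)
--     k = len(ban_int)
--     v, j = n, 0
--     for _ in range(k + 1):  # the fixpoint v = n + #{bans <= v} is always reached within k+1 rounds
--         while j < k and ban_int[j] <= v:
--             j += 1
--         v = n + j
--     return int_to_word(v)
-- ===== Notes on version B (the rewrite author's own statement) =====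
-- stated objective: alternative
-- what changed: Replaces A's cascading 'if ban <= n: n += 1' pass over the sorted bans by a two-pointer least-fixpoint iteration v <- n + j (j advanced while ban_int[j] <= v), proved to stabilise within len(bans)+1 rounds; converts words with a left-to-right Horner fold instead of a reversed power accumulator and builds the answer word by recursion instead of a prepending while-loop.
import Mathlib
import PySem

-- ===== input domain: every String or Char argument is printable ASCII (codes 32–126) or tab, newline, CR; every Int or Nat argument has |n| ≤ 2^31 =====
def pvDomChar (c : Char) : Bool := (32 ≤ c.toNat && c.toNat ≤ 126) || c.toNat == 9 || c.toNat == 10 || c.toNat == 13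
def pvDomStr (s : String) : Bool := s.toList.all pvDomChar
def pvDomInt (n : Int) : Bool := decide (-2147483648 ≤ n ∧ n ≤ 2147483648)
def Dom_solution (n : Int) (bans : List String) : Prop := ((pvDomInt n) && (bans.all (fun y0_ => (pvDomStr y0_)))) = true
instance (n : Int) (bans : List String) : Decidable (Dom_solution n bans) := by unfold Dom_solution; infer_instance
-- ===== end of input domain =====

-- B replaces A's cascading "if ban <= n: n += 1" pass by a two-pointer least-fixpoint
-- iteration v <- n + j over the sorted bans, a Horner-style word->int fold, and a recursive
-- int->word builder (objective: alternative — a structurally different same-cost algorithm).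


-- ===== PORT A =====
-- a_dict = {chr(i+96): i for i in range(1, 27)}  (single-character keys, ported as Char)
def aDictA : PySem.Dict Char Int :=
  PySem.Dict.ofList ((PySem.List.pyRange 1 27 1).map (fun i => (Char.ofNat (i + 96).toNat, i)))

-- inner loop: for idx, a in enumerate(reversed(ban)): tmp += mul*a_dict[a]; mul *= 26
-- a_dict[a] raises KeyError for a non-lowercase character: ported as getD 0; Pre_solution excludes those inputs
def banToIntA (ban : String) : Int :=
  ((PySem.List.enumerate ban.toList.reverse 0).foldl
    (fun (st : Int × Int) p => (st.1 + st.2 * (aDictA.getD p.2 0), st.2 * 26)) (0, 1)).1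

-- while n: n -= 1; answer = chr(97 + n%26) + answer; n //= 26
-- Python loops forever for n < 0 (excluded by Pre_solution); the port stops there
def whileA (n : Int) (answer : String) : String :=
  if _h : 0 < n then
    whileA (PySem.Int.floordiv (n - 1) 26)
      (String.ofList [Char.ofNat (97 + PySem.Int.mod (n - 1) 26).toNat] ++ answer)
  else answer
termination_by n.toNat
decreasing_by rw [PySem.Int.floordiv_eq_ediv_of_pos (by norm_num)]; omega

def solution (n : Int) (bans : List String) : String :=
  let banInt := bans.foldl (fun acc ban => acc ++ [banToIntA ban]) []
  let banSorted := PySem.List.sorted banInt (fun x => x) false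
  let n' := banSorted.foldl (fun m ban => if ban ≤ m then m + 1 else m) n
  whileA n' ""

-- ===== PORT B =====
def wordValB (w : String) : Int :=
  w.toList.foldl (fun v ch => v * 26 + (ch.toNat : Int) - 96) 0

-- while j < k and ban_int[j] <= v: j += 1   (ban_int[j] is in range since j < k)
def advanceB (banInt : List Int) (v : Int) (j : Nat) : Nat :=
  if h : j < banInt.length ∧ PySem.List.pyGetD banInt (j : Int) 0 ≤ v then
    advanceB banInt v (j + 1)
  else j
termination_by banInt.length - j
decreasing_by omega

def intToWordB (v : Int) : String :=
  if _h : v ≤ 0 then "" else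
    intToWordB (PySem.Int.floordiv (v - 1) 26) ++
      String.ofList [Char.ofNat (97 + PySem.Int.mod (v - 1) 26).toNat]
termination_by v.toNat
decreasing_by rw [PySem.Int.floordiv_eq_ediv_of_pos (by norm_num)]; omega

def solution_alt (n : Int) (bans : List String) : String :=
  let banInt := PySem.List.sorted (bans.map wordValB) (fun x => x) false
  let st := (List.range (banInt.length + 1)).foldl
      (fun (st : Int × Nat) _ => let j := advanceB banInt st.1 st.2; (n + j, j)) (n, 0)
  intToWordB st.1

-- ===== PRECONDITION & SPEC =====
-- Pre_ excludes exactly the inputs where the Python A does not return: a non-lowercase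
-- character raises KeyError in a_dict, and n < 0 makes the final `while n` loop run forever.
def Pre_solution (n : Int) (bans : List String) : Prop :=
  0 ≤ n ∧ (bans.all (fun ban => ban.toList.all (fun c => 97 ≤ c.toNat && c.toNat ≤ 122))) = true
instance (n : Int) (bans : List String) : Decidable (Pre_solution n bans) := by
  unfold Pre_solution; infer_instance

def pvWitness_solution : Int × List String := (3, ["ab", "z", ""])

def Spec_solution (n : Int) (bans : List String) (out : String) : Prop := out = solution_alt n bans
instance (n : Int) (bans : List String) (out : String) : Decidable (Spec_solution n bans out) := by
  unfold Spec_solution; infer_instance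

-- ===== CLAIM (what is proved, stated in full; the proofs are below) =====
def Claim_equal_solution : Prop := ∀ (n : Int) (bans : List String), Dom_solution n bans → Pre_solution n bans → Spec_solution n bans (solution n bans)

-- ===== LEMMAS AND PROOFS =====

def lowerChars : List Char :=
  ['a','b','c','d','e','f','g','h','i','j','k','l','m','n','o','p','q','r','s','t','u','v','w','x','y','z']

theorem mem_lowerChars (c : Char) (h1 : 97 ≤ c.toNat) (h2 : c.toNat ≤ 122) : c ∈ lowerChars := by
  have he : lowerChars = (List.range' 97 26).map Char.ofNat := by decide
  rw [he]
  exact List.mem_map.mpr ⟨c.toNat, by rw [List.mem_range'_1]; omega, Char.ofNat_toNat c⟩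

-- dict lookup: on a lowercase character, a_dict gives ord(c) - 96
theorem aDictA_getD (c : Char) (hc : c ∈ lowerChars) : aDictA.getD c 0 = (c.toNat : Int) - 96 := by
  fin_cases hc <;> decide

-- word -> int: both conversions compute the same value on lowercase words
def valLE : List Char → Int
  | [] => 0
  | c :: cs => ((c.toNat : Int) - 96) + 26 * valLE cs

theorem enumerate_foldl_snd {β : Type} (g : β → Char → β) :
    ∀ (ds : List Char) (s : Int) (st : β),
      (PySem.List.enumerate ds s).foldl (fun st p => g st p.2) st = ds.foldl g st := by
  intro ds
  induction ds with
  | nil => intro s st; simp [PySem.List.enumerate_nil]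
  | cons d ds ih => intro s st; simp [PySem.List.enumerate_cons, List.foldl_cons, ih]

theorem revfold_closed :
    ∀ (ds : List Char) (t m : Int),
      ds.foldl (fun (st : Int × Int) a => (st.1 + st.2 * ((a.toNat : Int) - 96), st.2 * 26)) (t, m)
        = (t + m * valLE ds, m * 26 ^ ds.length) := by
  intro ds
  induction ds with
  | nil => intro t m; simp [valLE]
  | cons d ds ih =>
      intro t m
      simp only [List.foldl_cons, ih, valLE, List.length_cons, Prod.mk.injEq]
      exact ⟨by ring, by ring⟩

theorem valLE_append (d : Char) :
    ∀ xs : List Char, valLE (xs ++ [d]) = valLE xs + ((d.toNat : Int) - 96) * 26 ^ xs.length := by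
  intro xs
  induction xs with
  | nil => simp [valLE]
  | cons x xs ih => simp only [List.cons_append, valLE, ih, List.length_cons]; ring

theorem horner_closed :
    ∀ (ds : List Char) (acc : Int),
      ds.foldl (fun v ch => v * 26 + (ch.toNat : Int) - 96) acc
        = acc * 26 ^ ds.length + valLE ds.reverse := by
  intro ds
  induction ds with
  | nil => intro acc; simp [valLE]
  | cons d ds ih =>
      intro acc
      simp only [List.foldl_cons, ih, List.reverse_cons, valLE_append, List.length_cons,
        List.length_reverse]
      ring

theorem banToIntA_eq_wordValB (ban : String) (hban : ∀ c ∈ ban.toList, c ∈ lowerChars) :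
    banToIntA ban = wordValB ban := by
  unfold banToIntA wordValB
  rw [enumerate_foldl_snd (fun st a => (st.1 + st.2 * (aDictA.getD a 0), st.2 * 26)) ban.toList.reverse 0 ((0 : Int), (1 : Int))]
  rw [PySem.List.foldl_congr_mem ban.toList.reverse
      (fun (st : Int × Int) a => (st.1 + st.2 * (aDictA.getD a 0), st.2 * 26))
      (fun (st : Int × Int) a => (st.1 + st.2 * ((a.toNat : Int) - 96), st.2 * 26))
      ((0 : Int), (1 : Int))
      (by intro acc x hx
          have := aDictA_getD x (hban x (List.mem_reverse.mp hx))
          simp [this])]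
  rw [revfold_closed, horner_closed]
  simp

-- counting: the number of bans ≤ v, as an Int
def countLeB (l : List Int) (v : Int) : Int := (l.countP (fun b => decide (b ≤ v)) : Int)

theorem countLeB_eq_countP (l : List Int) (v : Int) :
    countLeB l v = (l.countP (fun b => decide (b ≤ v)) : Int) := rfl

theorem countLeB_nonneg (l : List Int) (v : Int) : 0 ≤ countLeB l v := by
  rw [countLeB_eq_countP]; positivity

theorem countLeB_le_length (l : List Int) (v : Int) : countLeB l v ≤ (l.length : Int) := by
  rw [countLeB_eq_countP]; exact_mod_cast List.countP_le_length

theorem countLeB_mono (l : List Int) {v w : Int} (h : v ≤ w) : countLeB l v ≤ countLeB l w := by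
  rw [countLeB_eq_countP, countLeB_eq_countP]
  exact_mod_cast List.countP_mono_left (by intro b _ hb; simp_all; omega)

-- the cascade: A's sorted "if ban <= m: m += 1" pass
def cas (n : Int) (l : List Int) : Int := l.foldl (fun m ban => if ban ≤ m then m + 1 else m) n

theorem cas_ge : ∀ (l : List Int) (n : Int), n ≤ cas n l := by
  intro l
  induction l with
  | nil => intro n; simp [cas]
  | cons b l ih =>
      intro n
      unfold cas
      simp only [List.foldl_cons]
      split
      · exact le_trans (by omega) (ih (n + 1))
      · exact ih n

theorem cas_const : ∀ (l : List Int) (n : Int), (∀ b ∈ l, ¬ b ≤ n) → cas n l = n := by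
  intro l
  induction l with
  | nil => intro n _; rfl
  | cons b l ih =>
      intro n h
      unfold cas
      simp only [List.foldl_cons, if_neg (h b (by simp))]
      exact ih n (fun x hx => h x (by simp [hx]))

theorem cas_fix : ∀ (l : List Int), l.Pairwise (· ≤ ·) → ∀ n : Int, cas n l = n + countLeB l (cas n l) := by
  intro l
  induction l with
  | nil => intro _ n; simp [cas, countLeB]
  | cons b l ih =>
      intro hp n
      rcases List.pairwise_cons.mp hp with ⟨hb, hl⟩
      by_cases hbn : b ≤ n
      · have hstep : cas n (b :: l) = cas (n + 1) l := by
          unfold cas; simp [List.foldl_cons, if_pos hbn]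
        rw [hstep, countLeB_eq_countP, List.countP_cons,
          if_pos (by simp; exact le_trans hbn (by have := cas_ge l (n + 1); omega))]
        have := ih hl (n + 1)
        rw [countLeB_eq_countP] at this
        push_cast
        omega
      · have hall : ∀ x ∈ l, ¬ x ≤ n := fun x hx => by have := hb x hx; omega
        have hstep : cas n (b :: l) = n := by
          unfold cas
          simp only [List.foldl_cons, if_neg hbn]
          exact cas_const l n hall
        rw [hstep, countLeB_eq_countP, List.countP_cons, if_neg (by simpa using hbn),
          List.countP_eq_zero.mpr (by intro x hx; simpa using hall x hx)]
        simp
  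
theorem cas_min : ∀ (l : List Int), l.Pairwise (· ≤ ·) →
    ∀ n v : Int, n ≤ v → n + countLeB l v ≤ v → cas n l ≤ v := by
  intro l
  induction l with
  | nil => intro _ n v h _; simpa [cas] using h
  | cons b l ih =>
      intro hp n v hnv hcnt
      rcases List.pairwise_cons.mp hp with ⟨hb, hl⟩
      by_cases hbn : b ≤ n
      · have hstep : cas n (b :: l) = cas (n + 1) l := by
          unfold cas; simp [List.foldl_cons, if_pos hbn]
        rw [hstep]
        rw [countLeB_eq_countP, List.countP_cons, if_pos (by simp; omega)] at hcnt
        have hc := countLeB_nonneg l v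
        rw [countLeB_eq_countP] at hc
        refine ih hl (n + 1) v (by push_cast at hcnt; omega) ?_
        rw [countLeB_eq_countP]; push_cast at hcnt ⊢; omega
      · have hall : ∀ x ∈ l, ¬ x ≤ n := fun x hx => by have := hb x hx; omega
        have hstep : cas n (b :: l) = n := by
          unfold cas
          simp only [List.foldl_cons, if_neg hbn]
          exact cas_const l n hall
        omega

-- the fixpoint iteration: B's v <- n + countLeB l v, run length l + 1 times
theorem iter_le_cas (ls : List Int) (hp : ls.Pairwise (· ≤ ·)) (n : Int) :
    ∀ t : Nat, (fun v => n + countLeB ls v)^[t] n ≤ cas n ls := by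
  intro t
  induction t with
  | zero => simpa using cas_ge ls n
  | succ t ih =>
      rw [Function.iterate_succ_apply']
      calc n + countLeB ls ((fun v => n + countLeB ls v)^[t] n)
          ≤ n + countLeB ls (cas n ls) := by have := countLeB_mono ls ih; omega
        _ = cas n ls := (cas_fix ls hp n).symm

theorem iter_mono (l : List Int) (n : Int) :
    ∀ t : Nat, (fun v => n + countLeB l v)^[t] n ≤ (fun v => n + countLeB l v)^[t + 1] n := by
  intro t
  induction t with
  | zero => simpa using countLeB_nonneg l n
  | succ t ih =>
      rw [Function.iterate_succ_apply', Function.iterate_succ_apply']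
      have := countLeB_mono l ih
      omega

theorem iter_stable (l : List Int) (n : Int) :
    ∀ t : Nat, (fun v => n + countLeB l v)^[t + 1] n = (fun v => n + countLeB l v)^[t] n ∨
      (t : Int) + n ≤ (fun v => n + countLeB l v)^[t] n := by
  intro t
  induction t with
  | zero => right; simp
  | succ t ih =>
      rcases ih with heq | hge
      · left
        rw [Function.iterate_succ_apply' (fun v => n + countLeB l v) (t + 1) n, heq,
          ← Function.iterate_succ_apply' (fun v => n + countLeB l v) t n]
        exact heq
      · by_cases heq : (fun v => n + countLeB l v)^[t + 1] n = (fun v => n + countLeB l v)^[t] n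
        · left
          rw [Function.iterate_succ_apply' (fun v => n + countLeB l v) (t + 1) n, heq,
            ← Function.iterate_succ_apply' (fun v => n + countLeB l v) t n]
          exact heq
        · right
          have := iter_mono l n t
          push_cast
          omega

theorem iter_fixes (l : List Int) (n : Int) :
    (fun v => n + countLeB l v)^[l.length + 1] n
      = n + countLeB l ((fun v => n + countLeB l v)^[l.length + 1] n) := by
  rcases iter_stable l n (l.length + 1) with heq | hge
  · conv_lhs => rw [← heq]
    rw [Function.iterate_succ_apply' (fun v => n + countLeB l v) (l.length + 1) n]
  · exfalso
    have hb : (fun v => n + countLeB l v)^[l.length + 1] n ≤ n + l.length := by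
      rw [Function.iterate_succ_apply']
      have := countLeB_le_length l ((fun v => n + countLeB l v)^[l.length] n)
      omega
    push_cast at hge
    omega

theorem iter_eq_cas (ls : List Int) (hp : ls.Pairwise (· ≤ ·)) (n : Int) :
    (fun v => n + countLeB ls v)^[ls.length + 1] n = cas n ls := by
  have hfix := iter_fixes ls n
  have hle := iter_le_cas ls hp n (ls.length + 1)
  have hnn := countLeB_nonneg ls ((fun v => n + countLeB ls v)^[ls.length + 1] n)
  have hge : cas n ls ≤ (fun v => n + countLeB ls v)^[ls.length + 1] n := by
    refine cas_min ls hp n _ ?_ ?_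
    · omega
    · omega
  omega

-- the pointer scan: on a sorted list, advancing j while ban_int[j] <= v lands on #{bans <= v}
theorem sorted_countP_le (ls : List Int) (hp : ls.Pairwise (· ≤ ·)) (x : Int) (j : Nat)
    (hj : j < ls.length) (hgt : ¬ ls.getD j 0 ≤ x) :
    ls.countP (fun b => decide (b ≤ x)) ≤ j := by
  have hsplit : ls.countP (fun b => decide (b ≤ x))
      = (ls.take j).countP (fun b => decide (b ≤ x)) + (ls.drop j).countP (fun b => decide (b ≤ x)) := by
    conv_lhs => rw [← List.take_append_drop j ls]
    rw [List.countP_append]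
  have h1 : (ls.take j).countP (fun b => decide (b ≤ x)) ≤ j := by
    calc (ls.take j).countP (fun b => decide (b ≤ x)) ≤ (ls.take j).length := List.countP_le_length
      _ ≤ j := by simp
  have h2 : (ls.drop j).countP (fun b => decide (b ≤ x)) = 0 := by
    refine List.countP_eq_zero.mpr ?_
    intro a ha
    rcases List.mem_iff_getElem.mp ha with ⟨m, hm, rfl⟩
    have hidx : (ls.drop j)[m] = ls[j + m]'(by simp at hm; omega) := by
      rw [List.getElem_drop]
    have hmono : ls[j] ≤ ls[j + m]'(by simp at hm; omega) := by
      rcases Nat.eq_zero_or_pos m with hm0 | hm0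
      · subst hm0; rfl
      · exact (List.pairwise_iff_getElem.mp hp) j (j + m) hj (by simp at hm; omega) (by omega)
    have hgt' : ¬ ls[j] ≤ x := by rwa [List.getD_eq_getElem ls 0 hj] at hgt
    simp only [hidx, decide_eq_true_eq]
    omega
  omega

theorem sorted_countP_ge (ls : List Int) (x : Int) (j : Nat)
    (hj : j ≤ ls.length) (hall : ∀ i, i < j → ls.getD i 0 ≤ x) :
    j ≤ ls.countP (fun b => decide (b ≤ x)) := by
  have hsplit : ls.countP (fun b => decide (b ≤ x))
      = (ls.take j).countP (fun b => decide (b ≤ x)) + (ls.drop j).countP (fun b => decide (b ≤ x)) := by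
    conv_lhs => rw [← List.take_append_drop j ls]
    rw [List.countP_append]
  have h1 : (ls.take j).countP (fun b => decide (b ≤ x)) = (ls.take j).length := by
    refine List.countP_eq_length.mpr ?_
    intro a ha
    rcases List.mem_iff_getElem.mp ha with ⟨m, hm, rfl⟩
    have hmlt : m < j := by simp at hm; omega
    have hml : m < ls.length := by simp at hm; omega
    have hidx : (ls.take j)[m] = ls[m] := List.getElem_take
    have := hall m hmlt
    rw [List.getD_eq_getElem ls 0 hml] at this
    simp only [hidx, decide_eq_true_eq]
    exact this
  have h2 : (ls.take j).length = j := by simp; omega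
  omega

theorem advanceB_eq (ls : List Int) (hp : ls.Pairwise (· ≤ ·)) (v : Int) :
    ∀ (fuel j : Nat), ls.length - j = fuel → j ≤ ls.length →
      (∀ i, i < j → ls.getD i 0 ≤ v) →
      advanceB ls v j = ls.countP (fun b => decide (b ≤ v)) := by
  intro fuel
  induction fuel with
  | zero =>
      intro j hfuel hj hall
      have hj' : j = ls.length := by omega
      rw [advanceB, dif_neg (by omega)]
      have hge := sorted_countP_ge ls v j hj hall
      have hle : ls.countP (fun b => decide (b ≤ v)) ≤ ls.length := List.countP_le_length
      omega
  | succ fuel ih =>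
      intro j hfuel hj hall
      have hjlt : j < ls.length := by omega
      by_cases hle : ls.getD j 0 ≤ v
      · rw [advanceB, dif_pos (by
          refine ⟨hjlt, ?_⟩
          rw [show ((j : Nat) : Int) = ((j : Nat) : Int) from rfl, PySem.List.pyGetD_natCast]
          exact hle)]
        refine ih (j + 1) (by omega) (by omega) ?_
        intro i hi
        rcases Nat.lt_succ_iff_lt_or_eq.mp hi with h | h
        · exact hall i h
        · subst h; exact hle
      · rw [advanceB, dif_neg (by
          rw [PySem.List.pyGetD_natCast]
          intro hc
          exact hle hc.2)]
        have h1 := sorted_countP_le ls hp v j hjlt hle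
        have h2 := sorted_countP_ge ls v j (by omega) hall
        omega

theorem foldl_state (ls : List Int) (hp : ls.Pairwise (· ≤ ·)) (n : Int) :
    ∀ t : Nat,
      ((List.range t).foldl
          (fun (st : Int × Nat) _ => let j := advanceB ls st.1 st.2; (n + j, j)) (n, 0)).1
        = (fun v => n + countLeB ls v)^[t] n
      ∧ ((List.range t).foldl
          (fun (st : Int × Nat) _ => let j := advanceB ls st.1 st.2; (n + j, j)) (n, 0)).2
        ≤ ls.length
      ∧ ∀ i, i < ((List.range t).foldl
          (fun (st : Int × Nat) _ => let j := advanceB ls st.1 st.2; (n + j, j)) (n, 0)).2 →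
          ls.getD i 0
            ≤ ((List.range t).foldl
                (fun (st : Int × Nat) _ => let j := advanceB ls st.1 st.2; (n + j, j)) (n, 0)).1 := by
  intro t
  induction t with
  | zero => exact ⟨rfl, by simp, by simp⟩
  | succ t ih =>
      rcases ih with ⟨h1, h2, h3⟩
      rw [List.range_succ, List.foldl_append, List.foldl_cons, List.foldl_nil]
      set st := (List.range t).foldl
          (fun (st : Int × Nat) _ => let j := advanceB ls st.1 st.2; (n + j, j)) (n, 0) with hst
      have hadv : advanceB ls st.1 st.2 = ls.countP (fun b => decide (b ≤ st.1)) :=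
        advanceB_eq ls hp st.1 (ls.length - st.2) st.2 rfl h2 h3
      have hfst : n + (advanceB ls st.1 st.2 : Int) = (fun v => n + countLeB ls v)^[t + 1] n := by
          rw [hadv, Function.iterate_succ_apply', ← h1, countLeB_eq_countP]
      refine ⟨hfst, by simp only; rw [hadv]; exact List.countP_le_length, ?_⟩
      intro i hi
      simp only at hi ⊢
      rw [hadv] at hi
      have hiL : i < ls.length := lt_of_lt_of_le hi List.countP_le_length
      have hle : ls.getD i 0 ≤ st.1 := by
        by_contra hgt
        have := sorted_countP_le ls hp st.1 i hiL hgt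
        omega
      have hmono : st.1 ≤ n + (advanceB ls st.1 st.2 : Int) := by
        rw [hfst, h1]
        exact iter_mono ls n t
      omega

-- int -> word: A's accumulator while-loop equals B's recursive builder
theorem whileA_eq_intToWordB : ∀ (x : Int) (acc : String), whileA x acc = intToWordB x ++ acc := by
  intro x
  induction hx : x.toNat using Nat.strong_induction_on generalizing x with
  | _ m ih =>
      intro acc
      by_cases h : 0 < x
      · rw [whileA, dif_pos h, intToWordB, dif_neg (by omega)]
        rw [ih (PySem.Int.floordiv (x - 1) 26).toNat
            (by rw [PySem.Int.floordiv_eq_ediv_of_pos (by norm_num)]; omega) _ rfl]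
        rw [String.append_assoc]
      · rw [whileA, dif_neg h, intToWordB, dif_pos (by omega), String.empty_append]

-- ===== VERDICT (by name: the statement is the Claim_ definition above) =====
theorem solution_spec : Claim_equal_solution := by
  intro n bans _ hpre
  rcases hpre with ⟨hn, hbans⟩
  simp only [List.all_eq_true, Bool.and_eq_true, decide_eq_true_eq] at hbans
  unfold Spec_solution solution solution_alt
  simp only
  rw [PySem.List.foldl_append_singleton_eq_map banToIntA bans [], List.nil_append]
  rw [List.map_congr_left (fun b hb => banToIntA_eq_wordValB b
      (fun c hc => mem_lowerChars c (hbans b hb c hc).1 (hbans b hb c hc).2))]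
  set ls := PySem.List.sorted (bans.map wordValB) (fun x => x) false with hls
  have hp : ls.Pairwise (· ≤ ·) := PySem.List.sorted_pairwise (bans.map wordValB) (fun x => x)
  rw [(foldl_state ls hp n (ls.length + 1)).1]
  rw [iter_eq_cas ls hp n]
  rw [whileA_eq_intToWordB, String.append_empty]
  rfl
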